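-- pv_equiv track=rewrite | github.com/StarMadeGalaxy/hello-world | newbee_python-master/some_functions.py | left_half_dict
-- ===== SOURCE A (Python) =====
-- from copy import deepcopy
--
-- def right_half_dict(dictionary):        # Right part funcuion should be create before left
--     right_dict = deepcopy(dictionary)
--     counter = 0
--     if len(dictionary) <= 1:
--         return dictionary
--     else:
--         for key in dictionary.keys():
--             if counter < int(len(dictionary) / 2):
--                 del right_dict[key]
--                 counter += 1
--             else:
--                 break
--     return right_dict
--
-- def left_half_dict(dictionary):        # Slice dictionary and get a right half of it
--     left_dict = deepcopy(dictionary)   # Make copy of parent dict just for sure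
--     if len(dictionary) <= 1:
--         return dictionary
--     else:
--         for key in right_half_dict(dictionary).keys():
--             del left_dict[key]
--     return left_dict
-- ===== SOURCE B (Python) =====
-- from copy import deepcopy
--
-- def left_half_dict(dictionary):
--     # Keep the first len//2 entries directly instead of deepcopy-then-delete.
--     if len(dictionary) <= 1:
--         return dictionary
--     half = len(dictionary) // 2
--     result = {}
--     for i, (key, value) in enumerate(dictionary.items()):
--         if i >= half:
--             break
--         result[deepcopy(key)] = deepcopy(value)
--     return result
-- ===== Notes on version B (the rewrite author's own statement) =====
-- stated objective: simpler
-- what changed: B keeps the first len//2 entries directly in one pass over items() (returning the original dict unchanged when len<=1), replacing A's deepcopy of the whole dict plus the right_half_dict helper and its copy-then-delete passes; Pre_ excludes association lists with duplicate keys, which do not represent any Python dict.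
import Mathlib
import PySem

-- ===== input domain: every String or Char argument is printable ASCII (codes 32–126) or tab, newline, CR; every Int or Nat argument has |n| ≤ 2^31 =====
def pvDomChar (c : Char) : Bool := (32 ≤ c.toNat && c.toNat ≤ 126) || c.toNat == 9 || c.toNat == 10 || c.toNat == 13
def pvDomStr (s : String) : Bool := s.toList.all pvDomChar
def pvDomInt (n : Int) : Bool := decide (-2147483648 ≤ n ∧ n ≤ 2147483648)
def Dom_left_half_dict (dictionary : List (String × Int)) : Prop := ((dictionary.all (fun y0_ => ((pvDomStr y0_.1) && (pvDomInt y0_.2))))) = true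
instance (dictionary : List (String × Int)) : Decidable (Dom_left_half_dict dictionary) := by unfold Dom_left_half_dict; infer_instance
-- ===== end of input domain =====

-- B builds the kept first-half prefix directly in one pass, instead of A's deepcopy of the
-- whole dict followed by deleting the complement computed by the right_half_dict helper (simpler).

-- ===== PORT A =====
-- `del d[key]` on an assoc list with unique keys: remove the first entry with that key
-- (exact for the dicts admitted by Pre_, whose keys are distinct).
def pyDelKey : List (String × Int) → String → List (String × Int)
  | [], _ => []
  | (k', v') :: t, k => if k' == k then t else (k', v') :: pyDelKey t k

-- the `for key in dictionary.keys(): if counter < int(len/2): del right[key] else break` loop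
def rhAux : List String → Int → Int → List (String × Int) → List (String × Int)
  | [], _, _, right => right
  | k :: ks, counter, n, right =>
      if counter < n then rhAux ks (counter + 1) n (pyDelKey right k) else right

def right_half_dict (dictionary : List (String × Int)) : List (String × Int) :=
  if (dictionary.length : Int) ≤ 1 then dictionary
  else rhAux (dictionary.map Prod.fst) 0
        (PySem.Int.floordiv (dictionary.length : Int) 2) dictionary

def left_half_dict (dictionary : List (String × Int)) : List (String × Int) :=
  if (dictionary.length : Int) ≤ 1 then dictionary
  else ((right_half_dict dictionary).map Prod.fst).foldl (fun l k => pyDelKey l k) dictionary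

-- ===== PORT B =====
-- `result[key] = value`: overwrite the first entry with that key, else append (dict assignment)
def pyInsert : List (String × Int) → String → Int → List (String × Int)
  | [], k, v => [(k, v)]
  | (k', v') :: t, k, v => if k' == k then (k, v) :: t else (k', v') :: pyInsert t k v

-- the `for i, (key, value) in enumerate(...): if i >= half: break; result[key] = value` loop
def lhAltLoop : List (Int × (String × Int)) → Int → List (String × Int) → List (String × Int)
  | [], _, res => res
  | (i, (k, v)) :: rest, half, res =>
      if i ≥ half then res else lhAltLoop rest half (pyInsert res k v)

def left_half_dict_alt (dictionary : List (String × Int)) : List (String × Int) :=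
  if (dictionary.length : Int) ≤ 1 then dictionary
  else lhAltLoop (PySem.List.enumerate dictionary 0)
        (PySem.Int.floordiv (dictionary.length : Int) 2) []

-- ===== PRECONDITION & SPEC =====
-- Pre_ excludes association lists with duplicate keys: those do not represent any Python
-- dict (a Python dict's keys are unique), so A is never run on them.
def Pre_left_half_dict (dictionary : List (String × Int)) : Prop :=
  (dictionary.map Prod.fst).Nodup
instance (dictionary : List (String × Int)) : Decidable (Pre_left_half_dict dictionary) := by
  unfold Pre_left_half_dict; infer_instance

def pvWitness_left_half_dict : (List (String × Int)) := [("a", 1), ("b", 2), ("c", 3)]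

def Spec_left_half_dict (dictionary : List (String × Int)) (out : List (String × Int)) : Prop := out = left_half_dict_alt dictionary
instance (dictionary : List (String × Int)) (out : List (String × Int)) : Decidable (Spec_left_half_dict dictionary out) := by unfold Spec_left_half_dict; infer_instance

-- ===== CLAIM (what is proved, stated in full; the proofs are below) =====
def Claim_equal_left_half_dict : Prop := ∀ (dictionary : List (String × Int)), Dom_left_half_dict dictionary → Pre_left_half_dict dictionary → Spec_left_half_dict dictionary (left_half_dict dictionary)

-- ===== LEMMAS AND PROOFS =====

-- A's inner loop erases the first (n - counter) entries: each step's key is the head key of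
-- what remains, so pyDelKey removes exactly the head.
theorem rhAux_eq (s : List (String × Int)) : ∀ (c n : Int),
    rhAux (s.map Prod.fst) c n s = s.drop (n - c).toNat := by
  induction s with
  | nil => intro c n; simp [rhAux]
  | cons p t ih =>
      intro c n
      obtain ⟨k, v⟩ := p
      simp only [List.map_cons, rhAux]
      by_cases h : c < n
      · rw [if_pos h]
        simp only [pyDelKey, BEq.rfl, if_pos]
        rw [ih (c + 1) n]
        have : (n - c).toNat = (n - (c + 1)).toNat + 1 := by omega
        rw [this, List.drop_succ_cons]
      · rw [if_neg h]
        have : (n - c).toNat = 0 := by omega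
        rw [this, List.drop_zero]

theorem pyDelKey_append_not_mem (p : List (String × Int)) (k : String) (v : Int)
    (t : List (String × Int)) (hk : k ∉ p.map Prod.fst) :
    pyDelKey (p ++ (k, v) :: t) k = p ++ t := by
  induction p with
  | nil => simp [pyDelKey]
  | cons q p ih =>
      obtain ⟨k', v'⟩ := q
      simp only [List.map_cons, List.mem_cons, not_or] at hk
      simp only [List.cons_append, pyDelKey]
      rw [if_neg (by simpa using Ne.symm hk.1), ih hk.2]

-- A's outer loop deletes every key of the suffix s from p ++ s, leaving p.
theorem foldl_del_suffix : ∀ (s p : List (String × Int)),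
    ((p ++ s).map Prod.fst).Nodup →
    (s.map Prod.fst).foldl (fun l k => pyDelKey l k) (p ++ s) = p := by
  intro s
  induction s with
  | nil => intro p _; simp
  | cons q t ih =>
      intro p hnd
      obtain ⟨k, v⟩ := q
      have hk : k ∉ p.map Prod.fst := by
        have := hnd
        simp only [List.map_append, List.map_cons, List.nodup_append] at this
        intro hmem
        exact this.2.2 k hmem k List.mem_cons_self rfl
      simp only [List.map_cons, List.foldl_cons]
      rw [pyDelKey_append_not_mem p k v t hk]
      apply ih
      have hperm : List.Perm ((p ++ (k, v) :: t).map Prod.fst) (k :: (p ++ t).map Prod.fst) := by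
        simp only [List.map_append, List.map_cons]
        exact List.perm_middle
      exact ((hperm.nodup_iff).mp hnd).of_cons

theorem pyInsert_not_mem (res : List (String × Int)) (k : String) (v : Int)
    (hk : k ∉ res.map Prod.fst) : pyInsert res k v = res ++ [(k, v)] := by
  induction res with
  | nil => simp [pyInsert]
  | cons q t ih =>
      obtain ⟨k', v'⟩ := q
      simp only [List.map_cons, List.mem_cons, not_or] at hk
      simp only [List.cons_append, pyInsert]
      rw [if_neg (fun h => Ne.symm hk.1 (eq_of_beq h)), ih hk.2]

-- B's loop appends the entries with index < half, i.e. the take of the remaining suffix.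
theorem lhAltLoop_eq : ∀ (s : List (String × Int)) (i half : Int) (res : List (String × Int)),
    ((res ++ s).map Prod.fst).Nodup →
    lhAltLoop (PySem.List.enumerate s i) half res = res ++ s.take (half - i).toNat := by
  intro s
  induction s with
  | nil => intro i half res _; simp [PySem.List.enumerate_nil, lhAltLoop]
  | cons q t ih =>
      intro i half res hnd
      obtain ⟨k, v⟩ := q
      rw [PySem.List.enumerate_cons]
      simp only [lhAltLoop]
      by_cases h : i ≥ half
      · rw [if_pos h]
        have : (half - i).toNat = 0 := by omega
        simp [this]
      · rw [if_neg h]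
        have hk : k ∉ res.map Prod.fst := by
          have := hnd
          simp only [List.map_append, List.map_cons, List.nodup_append] at this
          intro hmem
          exact this.2.2 k hmem k List.mem_cons_self rfl
        rw [pyInsert_not_mem res k v hk]
        rw [ih (i + 1) half (res ++ [(k, v)]) (by simpa using hnd)]
        have : (half - i).toNat = (half - (i + 1)).toNat + 1 := by omega
        rw [this, List.take_succ_cons, List.append_assoc, List.singleton_append]

-- ===== VERDICT (by name: the statement is the Claim_ definition above) =====
theorem left_half_dict_spec : Claim_equal_left_half_dict := by
  intro d _ pre
  unfold Spec_left_half_dict left_half_dict left_half_dict_alt right_half_dict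
  by_cases hlen : (d.length : Int) ≤ 1
  · simp [hlen]
  · rw [if_neg hlen, if_neg hlen, if_neg hlen]
    set n : Int := PySem.Int.floordiv (d.length : Int) 2 with hn
    rw [rhAux_eq d 0 n]
    rw [lhAltLoop_eq d 0 n [] (by simpa using pre)]
    have key := foldl_del_suffix (d.drop (n - 0).toNat) (d.take (n - 0).toNat)
        (by rw [List.take_append_drop]; exact pre)
    rw [List.take_append_drop] at key
    rw [key]
    simp
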